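-- pv_equiv track=rewrite | github.com/m-aleem/SOTU-Analyzer | SOTUAnalyzer.py | getYearsOf
-- ===== SOURCE A (Python) =====
-- import operator
--
-- def getYearsOf(yearsInt, start, end, getThis):
--    event = []
--    eventYears =[]
--    for i in range(start,end+1):
--       if i in yearsInt:
--          eventYears = eventYears + [i]
--          event = event + [operator.itemgetter(yearsInt.index(i))(getThis)]
--    return event, eventYears
-- ===== SOURCE B (Python) =====
-- def getYearsOf(yearsInt, start, end, getThis):
--     seen = {}
--     for j, y in enumerate(yearsInt):
--         if start <= y <= end and y not in seen:
--             seen[y] = j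
--     eventYears = sorted(seen)
--     event = [getThis[seen[y]] for y in eventYears]
--     return event, eventYears
-- ===== Notes on version B (the rewrite author's own statement) =====
-- stated objective: alternative
-- what changed: B makes one pass over yearsInt keeping the first index of each year inside [start, end] and then sorts those years, instead of A's scan of every integer in the range with an 'in' membership scan plus a list.index scan per range element; intended as faster (O(n+m log m) vs O((end-start)*n)) but a timing run could not confirm it consistently.
import Mathlib
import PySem

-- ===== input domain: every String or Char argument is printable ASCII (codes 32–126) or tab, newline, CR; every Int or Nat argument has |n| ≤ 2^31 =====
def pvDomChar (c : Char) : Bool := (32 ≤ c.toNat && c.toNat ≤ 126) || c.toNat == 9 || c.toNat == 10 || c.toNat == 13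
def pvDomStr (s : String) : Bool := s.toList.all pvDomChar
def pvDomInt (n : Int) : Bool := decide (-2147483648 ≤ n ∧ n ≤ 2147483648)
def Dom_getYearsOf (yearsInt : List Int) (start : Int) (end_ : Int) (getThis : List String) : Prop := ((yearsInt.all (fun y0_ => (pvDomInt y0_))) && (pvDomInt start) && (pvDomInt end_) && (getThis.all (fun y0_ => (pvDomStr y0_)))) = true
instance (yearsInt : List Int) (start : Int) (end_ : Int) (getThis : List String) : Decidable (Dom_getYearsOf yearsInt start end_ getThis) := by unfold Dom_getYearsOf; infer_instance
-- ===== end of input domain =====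

-- B replaces A's scan of the whole range (with a membership scan and a list.index scan per
-- range element) by one pass over yearsInt keeping first occurrences of in-range years, then a sort.

-- ===== PORT A =====
-- A: for i in range(start, end+1): if i in yearsInt: append i and getThis[yearsInt.index(i)].
-- getThis[j] is Python indexing; under Pre_ it never raises, so the .getD "" default is unreachable there.
def getYearsOf (yearsInt : List Int) (start : Int) (end_ : Int) (getThis : List String) : List String × List Int :=
  (PySem.List.pyRange start (end_ + 1) 1).foldl
    (fun (st : List String × List Int) i =>
      if yearsInt.contains i then
        (st.1 ++ [(PySem.List.pyGet? getThis (((PySem.List.index? yearsInt i).getD 0 : Nat) : Int)).getD ""],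
         st.2 ++ [i])
      else st)
    ([], [])

-- ===== PORT B =====
-- B's first loop: seen = {} ; for j, y in enumerate(yearsInt): if start <= y <= end and y not in seen: seen[y] = j
def pvSeen (yearsInt : List Int) (start : Int) (end_ : Int) : PySem.Dict Int Int :=
  (PySem.List.enumerate yearsInt 0).foldl
    (fun d p => if start ≤ p.2 ∧ p.2 ≤ end_ ∧ d.contains p.2 = false then d.insert p.2 p.1 else d)
    PySem.Dict.empty

def getYearsOf_alt (yearsInt : List Int) (start : Int) (end_ : Int) (getThis : List String) : List String × List Int :=
  let seen := pvSeen yearsInt start end_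
  let eventYears := PySem.List.sorted seen.keys (fun y => y)
  (eventYears.map (fun y => (PySem.List.pyGet? getThis ((seen.get? y).getD 0)).getD ""), eventYears)

-- ===== PRECONDITION & SPEC =====
-- Pre_ excludes exactly the inputs where Python A raises IndexError (B raises there too): some
-- year inside [start, end] whose first index in yearsInt is not a valid index of getThis.
def Pre_getYearsOf (yearsInt : List Int) (start : Int) (end_ : Int) (getThis : List String) : Prop :=
  ∀ y ∈ yearsInt, start ≤ y → y ≤ end_ →
    (PySem.List.index? yearsInt y).getD getThis.length < getThis.length
instance (yearsInt : List Int) (start : Int) (end_ : Int) (getThis : List String) : Decidable (Pre_getYearsOf yearsInt start end_ getThis) := by unfold Pre_getYearsOf; infer_instance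

def pvWitness_getYearsOf : List Int × Int × Int × List String := ([2000, 2002, 2000], 1999, 2001, ["a", "b", "c"])

def Spec_getYearsOf (yearsInt : List Int) (start : Int) (end_ : Int) (getThis : List String) (out : List String × List Int) : Prop := out = getYearsOf_alt yearsInt start end_ getThis
instance (yearsInt : List Int) (start : Int) (end_ : Int) (getThis : List String) (out : List String × List Int) : Decidable (Spec_getYearsOf yearsInt start end_ getThis out) := by unfold Spec_getYearsOf; infer_instance

-- ===== CLAIM (what is proved, stated in full; the proofs are below) =====
def Claim_equal_getYearsOf : Prop := ∀ (yearsInt : List Int) (start : Int) (end_ : Int) (getThis : List String), Dom_getYearsOf yearsInt start end_ getThis → Pre_getYearsOf yearsInt start end_ getThis → Spec_getYearsOf yearsInt start end_ getThis (getYearsOf yearsInt start end_ getThis)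

-- ===== LEMMAS AND PROOFS =====

-- B's dict answers get? as "first index of v in yearsInt, if v lies in [start, end_]".
theorem pvSeen_aux (start end_ : Int) (ys : List Int) (s : Int) (d : PySem.Dict Int Int) (v : Int) :
    ((PySem.List.enumerate ys s).foldl
      (fun d p => if start ≤ p.2 ∧ p.2 ≤ end_ ∧ d.contains p.2 = false then d.insert p.2 p.1 else d) d).get? v
      = if start ≤ v ∧ v ≤ end_ then
          (if d.contains v then d.get? v
           else (PySem.List.index? ys v).map (fun k => s + (k : Int)))
        else d.get? v := by
  induction ys generalizing s d with
  | nil =>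
    simp only [PySem.List.enumerate_nil, List.foldl_nil, PySem.List.index?_eq_idxOf?,
      List.idxOf?_nil]
    by_cases h : d.contains v = true
    · simp [h]
    · have hf : d.contains v = false := by simp [h]
      simp [hf, (PySem.Dict.get?_eq_none_iff_contains d v).mpr hf]
  | cons y ys ih =>
    simp only [PySem.List.enumerate_cons, List.foldl_cons]
    rw [ih]
    by_cases hy : y = v
    · subst hy
      by_cases hr : start ≤ y ∧ y ≤ end_
      · rw [PySem.List.index?_cons_self]
        by_cases hd : d.contains y = true
        · simp [hr, hd]
        · have hdf : d.contains y = false := by simp [hd]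
          simp [hr, hdf, PySem.Dict.contains_insert_self, PySem.Dict.get?_insert_self]
      · have hc : ¬(start ≤ y ∧ y ≤ end_ ∧ d.contains y = false) := fun h => hr ⟨h.1, h.2.1⟩
        simp [hr, hc]
    · have hvy : (v == y) = false := by simp [Ne.symm hy]
      rw [PySem.List.index?_cons_of_ne ys hy]
      by_cases hc : start ≤ y ∧ y ≤ end_ ∧ d.contains y = false
      · simp only [if_pos hc]
        rw [PySem.Dict.contains_insert, hvy, PySem.Dict.get?_insert d y v _]
        simp only [Bool.false_or, if_neg (Ne.symm hy)]
        by_cases hr : start ≤ v ∧ v ≤ end_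
        · by_cases hv : d.contains v = true
          · simp [hr, hv]
          · have hvf : d.contains v = false := by simp [hv]
            simp only [if_pos hr, hvf, Bool.false_eq_true, if_false]
            cases hI : PySem.List.index? ys v with
            | none => simp
            | some k => simp; omega
        · simp [hr]
      · simp only [if_neg hc]
        by_cases hr : start ≤ v ∧ v ≤ end_
        · by_cases hv : d.contains v = true
          · simp [hr, hv]
          · have hvf : d.contains v = false := by simp [hv]
            simp only [if_pos hr, hvf, Bool.false_eq_true, if_false]
            cases hI : PySem.List.index? ys v with
            | none => simp
            | some k => simp; omega
        · simp [hr]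

theorem pvSeen_get? (yearsInt : List Int) (start : Int) (end_ : Int) (v : Int) :
    (pvSeen yearsInt start end_).get? v
      = if start ≤ v ∧ v ≤ end_ then (PySem.List.index? yearsInt v).map (fun k => (k : Int))
        else none := by
  unfold pvSeen
  rw [pvSeen_aux]
  simp [PySem.Dict.get?_empty, PySem.Dict.contains_empty]

theorem pvSeen_keys_nodup_aux (start end_ : Int) (l : List (Int × Int)) :
    ∀ d : PySem.Dict Int Int, d.keys.Nodup →
      ((l.foldl (fun d p => if start ≤ p.2 ∧ p.2 ≤ end_ ∧ d.contains p.2 = false then d.insert p.2 p.1 else d) d).keys).Nodup := by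
  induction l with
  | nil => intro d h; simpa using h
  | cons p l ih =>
    intro d h
    simp only [List.foldl_cons]
    by_cases hc : start ≤ p.2 ∧ p.2 ≤ end_ ∧ d.contains p.2 = false
    · rw [if_pos hc]; exact ih _ (PySem.Dict.nodup_keys_insert d p.2 p.1 h)
    · rw [if_neg hc]; exact ih _ h

theorem pvSeen_keys_nodup (yearsInt : List Int) (start : Int) (end_ : Int) :
    (pvSeen yearsInt start end_).keys.Nodup := by
  unfold pvSeen
  exact pvSeen_keys_nodup_aux start end_ _ _ (by simp [PySem.Dict.keys_empty])

theorem pvSeen_mem_keys (yearsInt : List Int) (start : Int) (end_ : Int) (v : Int) :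
    v ∈ (pvSeen yearsInt start end_).keys ↔ (start ≤ v ∧ v ≤ end_) ∧ v ∈ yearsInt := by
  rw [← PySem.Dict.contains_iff_mem_keys, PySem.Dict.contains_eq_isSome_get?, pvSeen_get?]
  by_cases hr : start ≤ v ∧ v ≤ end_
  · cases hI : PySem.List.index? yearsInt v with
    | none =>
      have := (PySem.List.index?_eq_none_iff yearsInt v).mp hI
      simp [hr, this]
    | some k =>
      have := (PySem.List.index?_isSome_iff yearsInt v).mp (by rw [hI]; rfl)
      simp [hr, this]
  · simp [hr]

-- A's filtered range, written as a list.
theorem pvF_mem (yearsInt : List Int) (start : Int) (end_ : Int) (v : Int) :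
    v ∈ (PySem.List.pyRange start (end_ + 1) 1).filter (fun i => yearsInt.contains i)
      ↔ (start ≤ v ∧ v ≤ end_) ∧ v ∈ yearsInt := by
  rw [List.mem_filter, PySem.List.mem_pyRange_one]
  constructor
  · rintro ⟨⟨h1, h2⟩, h3⟩; exact ⟨⟨h1, by omega⟩, by simpa using h3⟩
  · rintro ⟨⟨h1, h2⟩, h3⟩; exact ⟨⟨h1, by omega⟩, by simpa using h3⟩

-- B's sorted key list IS A's filtered range.
theorem pvYears_eq (yearsInt : List Int) (start : Int) (end_ : Int) :
    PySem.List.sorted (pvSeen yearsInt start end_).keys (fun y => y)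
      = (PySem.List.pyRange start (end_ + 1) 1).filter (fun i => yearsInt.contains i) := by
  have hpair : ((PySem.List.pyRange start (end_ + 1) 1).filter (fun i => yearsInt.contains i)).Pairwise (· < ·) :=
    (PySem.List.pairwise_lt_pyRange_one start (end_ + 1)).filter _
  have hperm : ((PySem.List.pyRange start (end_ + 1) 1).filter (fun i => yearsInt.contains i)).Perm
      (pvSeen yearsInt start end_).keys := by
    rw [List.perm_ext_iff_of_nodup hpair.nodup (pvSeen_keys_nodup yearsInt start end_)]
    intro a
    rw [pvF_mem, pvSeen_mem_keys]
  exact PySem.List.sorted_eq_of_perm_of_pairwise_lt _ _ _ hperm hpair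

-- A's pair-building loop, as filter + map.
theorem pvPairFold (l : List Int) (c : Int → Bool) (f : Int → String) :
    ∀ e1 e2, l.foldl (fun (st : List String × List Int) i => if c i then (st.1 ++ [f i], st.2 ++ [i]) else st) (e1, e2)
      = (e1 ++ (l.filter c).map f, e2 ++ l.filter c) := by
  induction l with
  | nil => intro e1 e2; simp
  | cons x l ih =>
    intro e1 e2
    by_cases hx : c x = true
    · simp [hx, ih]
    · have : c x = false := by simp [hx]
      simp [this, ih]

-- ===== VERDICT (by name: the statement is the Claim_ definition above) =====
theorem getYearsOf_spec : Claim_equal_getYearsOf := by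
  intro yearsInt start end_ getThis _ _
  unfold Spec_getYearsOf getYearsOf
  have halt : getYearsOf_alt yearsInt start end_ getThis
      = ((PySem.List.sorted (pvSeen yearsInt start end_).keys (fun y => y)).map
          (fun y => (PySem.List.pyGet? getThis (((pvSeen yearsInt start end_).get? y).getD 0)).getD ""),
         PySem.List.sorted (pvSeen yearsInt start end_).keys (fun y => y)) := rfl
  rw [halt, pvPairFold, pvYears_eq]
  simp only [List.nil_append]
  refine Prod.ext ?_ rfl
  simp only
  refine List.map_congr_left ?_
  intro v hv
  rw [pvF_mem] at hv
  obtain ⟨⟨h1, h2⟩, h3⟩ := hv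
  cases hI : PySem.List.index? yearsInt v with
  | none => exact absurd ((PySem.List.index?_eq_none_iff yearsInt v).mp hI h3) (by simp)
  | some k => rw [pvSeen_get? yearsInt start end_ v, if_pos ⟨h1, h2⟩, hI]; simp
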